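-- pv_equiv track=rewrite | github.com/grinventions/mimblewimble-py | mimblewimble/mmr/index.py | family_branch
-- ===== SOURCE A (Python) =====
-- def _all_ones_64():
--     return (1 << 64) - 1
--
-- def peak_map_height(size: int):
--     """Return (peak_bitmap, next_height) for an MMR of *size* nodes.
--
--     peak_bitmap has one bit set per peak, ordered most-significant = tallest.
--     next_height is the height that the NEXT appended node would have.
--     Matches Rust ``peak_map_height(size)``.
--
--     Test vectors (some_peak_map):
--       peak_map_height(0) = (0, 0)
--       peak_map_height(1) = (1, 0)
--       peak_map_height(3) = (2, 0)   # 0b10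
--       peak_map_height(4) = (3, 0)   # 0b11
--       peak_map_height(7) = (4, 0)   # 0b100
--     """
--     if size == 0:
--         return (0, 0)
--     # largest power-of-2 minus 1 that fits in size
--     peak_size = _all_ones_64() >> bin(size).count(
--         "0"
--     )  # NOT correct — use leading zeros
--     # Replicate Rust: ALL_ONES >> size.leading_zeros()
--     leading = 64 - size.bit_length()
--     peak_size = _all_ones_64() >> leading
--     peak_map = 0
--     s = size
--     while peak_size != 0:
--         peak_map <<= 1
--         if s >= peak_size:
--             s -= peak_size
--             peak_map |= 1
--         peak_size >>= 1
--     return (peak_map, s)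
--
-- def bintree_postorder_height(pos0: int) -> int:
--     """Height of node at 0-based position pos0 in the MMR.
--
--     height 0 = leaf.
--     Uses peak_map_height(pos0)[1] — the height of the node *at* pos0
--     (not the node *after* it).
--
--     Test vectors (first_100_mmr_heights):
--       pos 0→0, 1→0, 2→1, 3→0, 4→0, 5→1, 6→2, 7→0 ...
--     """
--     _, h = peak_map_height(pos0)
--     return h
--
-- def family_branch(pos0: int, mmr_size: int):
--     """Return the Merkle proof path: list of (parent_pos0, sibling_pos0) from pos0 to its local peak.
--
--     Matches Rust ``family_branch(pos0, size)``.
--     Test vectors (various_branches):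
--       family_branch(0, 3) = [(2, 1)]
--       family_branch(1, 3) = [(2, 0)]
--       family_branch(2, 3) = []
--       family_branch(0, 7) = [(2, 1), (6, 5)]
--       family_branch(3, 4) = []
--       family_branch(3, 7) = [(5, 4), (6, 2)]
--     """
--     branch = []
--     current = pos0
--     while True:
--         h = bintree_postorder_height(current)
--         sibling_offset = (1 << (h + 1)) - 1
--         if bintree_postorder_height(current + 1) > h:
--             # right child
--             sibling = current - sibling_offset
--             parent = current + 1
--         else:
--             # left child
--             sibling = current + sibling_offset
--             parent = current + sibling_offset + 1
--         # Stop if parent exceeds MMR size (current is a local peak)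
--         if parent >= mmr_size:
--             break
--         branch.append((parent, sibling))
--         current = parent
--     return branch
-- ===== SOURCE B (Python) =====
-- def _decompose(k, s):
--     """Greedily take Mersenne peaks 2^k-1, 2^(k-1)-1, ..., 1 out of s.
--     Returns (peak_map, remainder): bit j-1 of peak_map says peak 2^j-1 was taken."""
--     if k == 0:
--         return (0, s)
--     peak = (1 << k) - 1
--     if s >= peak:
--         m, r = _decompose(k - 1, s - peak)
--         return (m + (1 << (k - 1)), r)
--     return _decompose(k - 1, s)
--
-- def _peak_map_height(size):
--     if size == 0:
--         return (0, 0)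
--     return _decompose(size.bit_length(), size)
--
-- def _climb(current, peak, peak_map, mmr_size):
--     """Recursive climb: bit `peak` of peak_map says the current node is a right child."""
--     if peak_map & peak:
--         parent, sibling = current + 1, current + 1 - 2 * peak
--     else:
--         parent, sibling = current + 2 * peak, current + 2 * peak - 1
--     if parent >= mmr_size:
--         return []
--     return [(parent, sibling)] + _climb(parent, 2 * peak, peak_map, mmr_size)
--
-- def family_branch(pos0: int, mmr_size: int):
--     """Merkle proof path from pos0 to its local peak.
--
--     The peak map of pos0 is computed ONCE (by a recursive greedy Mersenne
--     decomposition): bit h of it says whether the ancestor of pos0 at height h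
--     is a right child, so the recursive climb needs no height computations."""
--     peak_map, height = _peak_map_height(pos0)
--     return _climb(pos0, 1 << height, peak_map, mmr_size)
-- ===== Notes on version B (the rewrite author's own statement) =====
-- stated objective: alternative
-- what changed: B computes the peak map of pos0 once by a recursive greedy Mersenne decomposition and then climbs by a cons-building recursion that decides each step's left/right direction by testing one bit of that map (doubling the tracked peak per level), instead of A's while-loop that recomputes bintree_postorder_height (a full peak-map loop over all 64 bit positions) twice per iteration.
-- outside the precondition, e.g. on family_branch(-1, 5): A returns [(0, -1), (2, 1)], B raises ValueError
import Mathlib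
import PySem

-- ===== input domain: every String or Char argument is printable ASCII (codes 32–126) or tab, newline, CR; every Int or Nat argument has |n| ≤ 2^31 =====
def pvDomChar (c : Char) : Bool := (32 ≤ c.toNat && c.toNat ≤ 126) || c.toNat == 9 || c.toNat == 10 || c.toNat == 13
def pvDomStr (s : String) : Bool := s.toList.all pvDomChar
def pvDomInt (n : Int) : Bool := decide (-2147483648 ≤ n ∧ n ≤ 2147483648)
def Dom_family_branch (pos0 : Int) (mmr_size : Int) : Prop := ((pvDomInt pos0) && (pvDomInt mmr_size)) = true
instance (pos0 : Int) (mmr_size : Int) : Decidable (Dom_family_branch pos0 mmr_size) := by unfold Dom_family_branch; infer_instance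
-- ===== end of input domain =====

-- B computes the peak map of pos0 once (recursive greedy Mersenne decomposition) and climbs by a
-- cons-building recursion reading each step's direction off one bit of that map, instead of A's
-- while-loop recomputing two postorder heights per step (objective: alternative; speed not claimed).

-- ===== PORT A =====

-- A's helper `peak_map_height`: the Python loop `while peak_size != 0: peak_map <<= 1;
-- if s >= peak_size: s -= peak_size; peak_map |= 1; peak_size >>= 1`
-- (peak_map |= 1 on the freshly doubled, even, peak_map is +1).
-- State is kept in ℕ: every value reaching this helper under Pre_ is a non-negative Python int.
def pmhLoop (peak_size : ℕ) (peak_map : ℕ) (s : ℕ) : ℕ × ℕ :=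
  if peak_size = 0 then (peak_map, s)
  else pmhLoop (peak_size / 2) (2 * peak_map + (if peak_size ≤ s then 1 else 0))
        (if peak_size ≤ s then s - peak_size else s)
  termination_by peak_size
  decreasing_by exact Nat.div_lt_self (Nat.pos_of_ne_zero ‹_›) Nat.one_lt_two

-- Python's first assignment to peak_size (via bin(size).count("0")) is dead code that the very
-- next line overwrites; only the surviving value ALL_ONES >> (64 - size.bit_length()) is kept.
-- Nat.size is Python's int.bit_length() on non-negative ints.
def peak_map_height (size : ℕ) : ℕ × ℕ :=
  if size = 0 then (0, 0)
  else pmhLoop ((2 ^ 64 - 1) >>> (64 - Nat.size size)) 0 size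

def bintree_postorder_height (pos0 : ℕ) : ℕ := (peak_map_height pos0).2

-- One iteration of A's while-loop body: (parent, sibling) exactly as A computes them.
-- sibling is kept as Int (Python `current - sibling_offset` may be negative in general).
def stepA (current : ℕ) : ℕ × Int :=
  -- h := bintree_postorder_height current; sibling_offset := (1 << (h+1)) - 1
  if bintree_postorder_height current < bintree_postorder_height (current + 1) then
    -- right child
    (current + 1,
     (current : Int) - ((2 ^ (bintree_postorder_height current + 1) - 1 : ℕ) : Int))
  else
    -- left child
    (current + (2 ^ (bintree_postorder_height current + 1) - 1) + 1,
     (current : Int) + ((2 ^ (bintree_postorder_height current + 1) - 1 : ℕ) : Int))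

-- termination helper for A's loop: the parent is strictly above the current node
theorem stepA_lt (current : ℕ) : current < (stepA current).1 := by
  unfold stepA
  split <;> simp

def fbLoopA (mmr_size : Int) (current : ℕ) (acc : List (Int × Int)) : List (Int × Int) :=
  if mmr_size ≤ ((stepA current).1 : Int) then acc
  else fbLoopA mmr_size (stepA current).1 (acc ++ [(((stepA current).1 : Int), (stepA current).2)])
  termination_by (mmr_size - (current : Int)).toNat
  decreasing_by
    have h1 : ((current : ℕ) : Int) < ((stepA current).1 : Int) :=
      Int.ofNat_lt.mpr (stepA_lt current)
    have h2 : ((stepA current).1 : Int) < mmr_size := Int.not_le.mp ‹_›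
    exact (Int.toNat_lt_toNat (Int.sub_pos.mpr (h1.trans h2))).mpr (sub_lt_sub_left h1 mmr_size)

def family_branch (pos0 : Int) (mmr_size : Int) : List (Int × Int) :=
  fbLoopA mmr_size pos0.toNat []   -- pos0 ≥ 0 under Pre_

-- ===== PORT B =====

-- B's `_decompose(k, s)`: recursive greedy decomposition into peaks 2^k-1, …, 1.
-- Python `m + (1 << (k-1))` is the `+ 2 ^ k` of the k+1 → k step.
def decomposeB (k : ℕ) (s : ℕ) : ℕ × ℕ :=
  match k with
  | 0 => (0, s)
  | Nat.succ k =>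
    if 2 ^ (k + 1) - 1 ≤ s then
      ((decomposeB k (s - (2 ^ (k + 1) - 1))).1 + 2 ^ k, (decomposeB k (s - (2 ^ (k + 1) - 1))).2)
    else decomposeB k s

-- B's `_peak_map_height` (size.bit_length() = Nat.size on non-negative ints)
def pmhB (size : ℕ) : ℕ × ℕ :=
  if size = 0 then (0, 0) else decomposeB (Nat.size size) size

-- B's `_climb`, a cons-building recursion; fuel is a totality guard only:
-- 64 always suffices on Dom (the equivalence proof below shows the recursion
-- has returned [] by then), it is not part of B's algorithm.
def climbB (current : ℕ) (peak : ℕ) (peak_map : ℕ) (mmr_size : Int) (fuel : ℕ) :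
    List (Int × Int) :=
  match fuel with
  | 0 => []
  | Nat.succ fuel =>
    let ps : ℕ × Int :=
      if peak_map &&& peak ≠ 0 then
        (current + 1, (current : Int) + 1 - 2 * (peak : Int))            -- right child
      else
        (current + 2 * peak, (current : Int) + 2 * (peak : Int) - 1)     -- left child
    if mmr_size ≤ (ps.1 : Int) then []
    else (((ps.1 : Int)), ps.2) :: climbB ps.1 (2 * peak) peak_map mmr_size fuel

def family_branch_alt (pos0 : Int) (mmr_size : Int) : List (Int × Int) :=
  climbB pos0.toNat (2 ^ (pmhB pos0.toNat).2) (pmhB pos0.toNat).1 mmr_size 64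

-- ===== PRECONDITION & SPEC =====
-- Pre_ excludes negative positions: for pos0 ≤ -2 the Python A raises ValueError
-- (left shift by the negative "height"), and at pos0 = -1 A's arithmetic on a negative
-- height is accidental — B raises ValueError there.
def Pre_family_branch (pos0 : Int) (mmr_size : Int) : Prop := 0 ≤ pos0
instance (pos0 : Int) (mmr_size : Int) : Decidable (Pre_family_branch pos0 mmr_size) := by
  unfold Pre_family_branch; infer_instance

def pvWitness_family_branch : Int × Int := (3, 7)

def Spec_family_branch (pos0 : Int) (mmr_size : Int) (out : List (Int × Int)) : Prop := out = family_branch_alt pos0 mmr_size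
instance (pos0 : Int) (mmr_size : Int) (out : List (Int × Int)) : Decidable (Spec_family_branch pos0 mmr_size out) := by unfold Spec_family_branch; infer_instance

-- ===== CLAIM (what is proved, stated in full; the proofs are below) =====
def Claim_equal_family_branch : Prop := ∀ (pos0 : Int) (mmr_size : Int), Dom_family_branch pos0 mmr_size → Pre_family_branch pos0 mmr_size → Spec_family_branch pos0 mmr_size (family_branch pos0 mmr_size)

-- ===== LEMMAS AND PROOFS =====

-- ---- arithmetic spec layer: greedy Mersenne decomposition ----
-- pc n = number of 1-bits of n; tr n = number of trailing 1-bits of n.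
def pc (n : ℕ) : ℕ :=
  if n = 0 then 0 else pc (n / 2) + n % 2
  termination_by n
  decreasing_by omega

def tr (n : ℕ) : ℕ :=
  if n % 2 = 1 then tr (n / 2) + 1 else 0
  termination_by n
  decreasing_by omega

-- dec m h = Σ_{bit j set in m} (2^(j+1) - 1) + h = 2m - popcount m + h.
def dec (m h : ℕ) : ℕ := 2 * m + h - pc m

-- unconditional unfoldings of pc and tr (valid at 0 too)
theorem pc_zero : pc 0 = 0 := by rw [pc]; simp

theorem pc_rec (n : ℕ) : pc n = pc (n / 2) + n % 2 := by
  rcases Nat.eq_zero_or_pos n with h0 | h0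
  · subst h0; simp [pc_zero]
  · rw [pc, if_neg (by omega)]

theorem tr_rec (n : ℕ) : tr n = if n % 2 = 1 then tr (n / 2) + 1 else 0 := by
  rw [tr]

theorem pc_le (n : ℕ) : pc n ≤ n := by
  induction n using Nat.strong_induction_on with
  | _ n ih =>
    rcases Nat.eq_zero_or_pos n with h0 | h0
    · subst h0; rw [pc]; simp
    · rw [pc_rec]; have := ih (n / 2) (by omega); omega

theorem dec_eq (m h : ℕ) : dec m h + pc m = 2 * m + h := by
  unfold dec; have := pc_le m; omega

theorem tr_le_pc (n : ℕ) : tr n ≤ pc n := by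
  induction n using Nat.strong_induction_on with
  | _ n ih =>
    rw [tr_rec, pc_rec]
    by_cases h : n % 2 = 1
    · rw [if_pos h]; have := ih (n / 2) (by omega); omega
    · rw [if_neg h]; omega

-- m+1 flips the tr m trailing ones to 0 and sets the next bit
theorem pc_succ (n : ℕ) : pc (n + 1) + tr n = pc n + 1 := by
  induction n using Nat.strong_induction_on with
  | _ n ih =>
    rw [pc_rec (n + 1), pc_rec n, tr_rec]
    by_cases h : n % 2 = 1
    · rw [if_pos h]
      have h2 : (n + 1) / 2 = n / 2 + 1 := by omega
      have h3 : (n + 1) % 2 = 0 := by omega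
      rw [h2, h3]
      have := ih (n / 2) (by omega)
      omega
    · rw [if_neg h]
      have h2 : (n + 1) / 2 = n / 2 := by omega
      have h3 : (n + 1) % 2 = 1 := by omega
      rw [h2, h3]
      omega

-- a number with at least h trailing ones is at least 2^h - 1
theorem two_pow_sub_one_le_of_tr (h : ℕ) : ∀ m, h ≤ tr m → 2 ^ h - 1 ≤ m := by
  induction h with
  | zero => intro m _; simp
  | succ h ih =>
    intro m hle
    rw [tr_rec] at hle
    have hm : m % 2 = 1 := by by_contra hc; rw [if_neg hc] at hle; omega
    rw [if_pos hm] at hle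
    have := ih (m / 2) (by omega)
    have hp : (1 : ℕ) ≤ 2 ^ h := Nat.one_le_two_pow
    rw [pow_succ]
    omega

-- adding 2^k when bit k is clear adds one 1-bit
theorem pc_add_pow (k m : ℕ) (hbit : m / 2 ^ k % 2 = 0) : pc (m + 2 ^ k) = pc m + 1 := by
  induction k generalizing m with
  | zero =>
    simp at hbit
    simp only [pow_zero]
    rw [pc_rec (m + 1), pc_rec m]
    have : (m + 1) / 2 = m / 2 := by omega
    rw [this]
    omega
  | succ k ih =>
    rw [pc_rec (m + 2 ^ (k + 1)), pc_rec m]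
    have h2 : (2 : ℕ) ^ (k + 1) = 2 * 2 ^ k := by rw [pow_succ]; ring
    have hm2 : (m + 2 ^ (k + 1)) % 2 = m % 2 := by omega
    have hd2 : (m + 2 ^ (k + 1)) / 2 = m / 2 + 2 ^ k := by omega
    rw [hm2, hd2, ih (m / 2) ?_]
    · omega
    · have : m / 2 / 2 ^ k = m / 2 ^ (k + 1) := by
        rw [Nat.div_div_eq_div_mul, h2, Nat.mul_comm]
      omega

-- adding 2^k on top of exactly k trailing ones gives ≥ k+1 trailing ones
theorem tr_add_pow_of_tr (k m : ℕ) (htr : tr m = k) : k + 1 ≤ tr (m + 2 ^ k) := by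
  induction k generalizing m with
  | zero =>
    rw [tr_rec] at htr
    have hm : m % 2 = 0 := by by_contra h; rw [if_pos (by omega)] at htr; omega
    rw [tr_rec, if_pos (by omega)]; omega
  | succ k ih =>
    rw [tr_rec] at htr
    have hm : m % 2 = 1 := by by_contra h; rw [if_neg h] at htr; omega
    rw [if_pos hm] at htr
    have h2 : (2 : ℕ) ^ (k + 1) = 2 * 2 ^ k := by rw [pow_succ]; ring
    rw [tr_rec, if_pos (by omega)]
    have hd2 : (m + 2 ^ (k + 1)) / 2 = m / 2 + 2 ^ k := by omega
    rw [hd2]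
    have := ih (m / 2) (by omega)
    omega

-- adding a top bit 2^k, low part not all ones, keeps the trailing-ones count
theorem tr_add_pow (k m : ℕ) (h1 : m < 2 ^ k) (h2 : m ≠ 2 ^ k - 1) : tr (m + 2 ^ k) = tr m := by
  induction k generalizing m with
  | zero => simp at h1; omega
  | succ k ih =>
    have hp : (2 : ℕ) ^ (k + 1) = 2 * 2 ^ k := by rw [pow_succ]; ring
    have hpk : (1 : ℕ) ≤ 2 ^ k := Nat.one_le_two_pow
    rw [tr_rec (m + 2 ^ (k + 1)), tr_rec m]
    by_cases hm : m % 2 = 1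
    · rw [if_pos (by omega), if_pos hm]
      have hd2 : (m + 2 ^ (k + 1)) / 2 = m / 2 + 2 ^ k := by omega
      rw [hd2, ih (m / 2) (by omega) (by omega)]
    · rw [if_neg (by omega), if_neg hm]

-- bit h of m, for h ≤ tr m, is set exactly below the trailing-ones count
theorem div_parity_tr (h m : ℕ) (hle : h ≤ tr m) : m / 2 ^ h % 2 = 1 ↔ h < tr m := by
  induction h generalizing m with
  | zero =>
    simp only [pow_zero, Nat.div_one]
    rw [tr_rec]
    by_cases hm : m % 2 = 1
    · rw [if_pos hm]; omega
    · rw [if_neg hm]; omega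
  | succ h ih =>
    rw [tr_rec] at hle ⊢
    have hm : m % 2 = 1 := by by_contra hm; rw [if_neg hm] at hle; omega
    rw [if_pos hm] at hle ⊢
    have hd : m / 2 ^ (h + 1) = m / 2 / 2 ^ h := by
      rw [Nat.div_div_eq_div_mul, pow_succ, Nat.mul_comm]
    rw [hd, ih (m / 2) (by omega)]
    omega

-- bits strictly above h are unchanged by setting clear bit h
theorem div_add_pow (h m : ℕ) (hbit : m / 2 ^ h % 2 = 0) :
    (m + 2 ^ h) / 2 ^ (h + 1) = m / 2 ^ (h + 1) := by
  have hp : (0 : ℕ) < 2 ^ h := Nat.two_pow_pos h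
  have h1 : (m + 2 ^ h) / 2 ^ h = m / 2 ^ h + 1 := by
    rw [Nat.add_div_right _ hp]
  have h2 : ∀ x : ℕ, x / 2 ^ (h + 1) = x / 2 ^ h / 2 := by
    intro x; rw [Nat.div_div_eq_div_mul, pow_succ]
  rw [h2, h2, h1]
  omega

-- A's accumulator loop over peaks 2^k-1, …, 1 computes B's recursive decomposition
theorem pmhLoop_decomposeB (k : ℕ) : ∀ pm s,
    pmhLoop (2 ^ k - 1) pm s = (pm * 2 ^ k + (decomposeB k s).1, (decomposeB k s).2) := by
  induction k with
  | zero =>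
    intro pm s
    rw [pmhLoop]
    simp [decomposeB]
  | succ k ih =>
    intro pm s
    have hpk : (1 : ℕ) ≤ 2 ^ k := Nat.one_le_two_pow
    have h2k : (2 : ℕ) ^ (k + 1) = 2 * 2 ^ k := by rw [pow_succ]; ring
    rw [pmhLoop, if_neg (by omega : ¬(2 ^ (k + 1) - 1 = 0))]
    have hdiv : (2 ^ (k + 1) - 1) / 2 = 2 ^ k - 1 := by omega
    by_cases hge : 2 ^ (k + 1) - 1 ≤ s
    · rw [if_pos hge, hdiv, ih]
      simp only [decomposeB, if_pos hge]
      have h1 : (2 * pm + 1) * 2 ^ k + (decomposeB k (s - (2 ^ (k + 1) - 1))).1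
          = pm * 2 ^ (k + 1) + ((decomposeB k (s - (2 ^ (k + 1) - 1))).1 + 2 ^ k) := by
        rw [h2k]; ring
      rw [h1]
    · rw [if_neg hge, hdiv, ih]
      simp only [decomposeB, if_neg hge]
      have h1 : (2 * pm + 0) * 2 ^ k = pm * 2 ^ (k + 1) := by rw [h2k]; ring
      rw [h1]

-- the greedy decomposition inverts dec
theorem decomposeB_dec (k : ℕ) : ∀ m h, m < 2 ^ k → (m = 2 ^ k - 1 ∨ h ≤ tr m) →
    decomposeB k (dec m h) = (m, h) := by
  induction k with
  | zero =>
    intro m h hm _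
    simp only [pow_zero] at hm
    have hm0 : m = 0 := by omega
    subst hm0
    have : dec 0 h = h := by unfold dec; rw [pc_rec]; simp [pc]
    rw [this]; rfl
  | succ k ih =>
    intro m h hm hd
    have h2k : (2 : ℕ) ^ (k + 1) = 2 * 2 ^ k := by rw [pow_succ]; ring
    have hpk : (1 : ℕ) ≤ 2 ^ k := Nat.one_le_two_pow
    unfold decomposeB
    by_cases hbit : 2 ^ k ≤ m
    · obtain ⟨l, rfl⟩ : ∃ l, m = l + 2 ^ k := ⟨m - 2 ^ k, by omega⟩
      have hlk : l < 2 ^ k := by omega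
      have hpcm : pc (l + 2 ^ k) = pc l + 1 :=
        pc_add_pow k l (by rw [Nat.div_eq_of_lt hlk])
      have hdm : dec (l + 2 ^ k) h = dec l h + (2 ^ (k + 1) - 1) := by
        have e1 := dec_eq (l + 2 ^ k) h
        have e2 := dec_eq l h
        have := pc_le l
        omega
      have hge : 2 ^ (k + 1) - 1 ≤ dec (l + 2 ^ k) h := by omega
      rw [if_pos hge]
      have hsub : dec (l + 2 ^ k) h - (2 ^ (k + 1) - 1) = dec l h := by omega
      rw [hsub]
      have hvalid : l = 2 ^ k - 1 ∨ h ≤ tr l := by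
        rcases hd with hd | hd
        · left; omega
        · by_cases hll : l = 2 ^ k - 1
          · left; exact hll
          · right; rw [tr_add_pow k l hlk hll] at hd; exact hd
      rw [ih l h hlk hvalid]
    · have hmk : m < 2 ^ k := by omega
      have htr : h ≤ tr m := by
        rcases hd with hd | hd
        · omega
        · exact hd
      have hlt : ¬(2 ^ (k + 1) - 1 ≤ dec m h) := by
        have := dec_eq m h
        have := tr_le_pc m
        have := pc_le m
        omega
      rw [if_neg hlt, ih m h hmk (Or.inr htr)]

theorem exists_dec (s : ℕ) : ∃ m h, dec m h = s ∧ h ≤ tr m := by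
  induction s with
  | zero =>
    refine ⟨0, 0, ?_, Nat.zero_le _⟩
    unfold dec; rw [pc_rec]; simp [pc]
  | succ s ih =>
    obtain ⟨m, h, hdec, hv⟩ := ih
    by_cases hlt : h < tr m
    · refine ⟨m, h + 1, ?_, hlt⟩
      have := dec_eq m (h + 1)
      have := dec_eq m h
      omega
    · refine ⟨m + 1, 0, ?_, Nat.zero_le _⟩
      have e1 := dec_eq (m + 1) 0
      have e2 := dec_eq m h
      have e3 := pc_succ m
      omega

theorem m_le_dec (m h : ℕ) : m ≤ dec m h := by
  have := dec_eq m h; have := pc_le m; omega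

theorem shift_allones (sz : ℕ) (h : sz ≤ 64) : (2 ^ 64 - 1) >>> (64 - sz) = 2 ^ sz - 1 := by
  rw [Nat.shiftRight_eq_div_pow]
  have hmul : 2 ^ sz * 2 ^ (64 - sz) = 2 ^ 64 := by
    rw [← pow_add]; congr 1; omega
  have ha : (1 : ℕ) ≤ 2 ^ sz := Nat.one_le_two_pow
  have hb : (1 : ℕ) ≤ 2 ^ (64 - sz) := Nat.one_le_two_pow
  refine Nat.div_eq_of_lt_le ?_ ?_
  · rw [Nat.sub_mul, one_mul, hmul]; omega
  · rw [Nat.sub_add_cancel ha, hmul]; omega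

-- A's helper and B's helper agree on every size < 2^64
theorem pmh_eq_pmhB (s : ℕ) (hs : s < 2 ^ 64) : peak_map_height s = pmhB s := by
  unfold peak_map_height pmhB
  by_cases h0 : s = 0
  · rw [if_pos h0, if_pos h0]
  · rw [if_neg h0, if_neg h0]
    have hsz : Nat.size s ≤ 64 := Nat.size_le.mpr hs
    rw [shift_allones _ hsz, pmhLoop_decomposeB]
    simp

-- determinism: peak_map_height inverts dec on valid pairs
theorem pmh_eq (m h : ℕ) (hv : h ≤ tr m) (hb : dec m h < 2 ^ 64) :
    peak_map_height (dec m h) = (m, h) := by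
  by_cases h0 : dec m h = 0
  · have hpc := pc_le m
    have hde := dec_eq m h
    have hm0 : m = 0 := by omega
    have hh0 : h = 0 := by
      subst hm0
      have : pc 0 = 0 := by rw [pc_rec]; simp [pc]
      omega
    subst hm0; subst hh0
    rw [h0, peak_map_height]; simp
  · unfold peak_map_height
    rw [if_neg h0]
    have hsz : Nat.size (dec m h) ≤ 64 := Nat.size_le.mpr hb
    rw [shift_allones _ hsz, pmhLoop_decomposeB]
    have hmlt : m < 2 ^ Nat.size (dec m h) :=
      lt_of_le_of_lt (m_le_dec m h) (Nat.lt_size_self _)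
    rw [decomposeB_dec (Nat.size (dec m h)) m h hmlt (Or.inr hv)]
    simp

-- soundness: the output of peak_map_height is a valid pair decoding its input
theorem pmh_sound (s : ℕ) (hs : s < 2 ^ 64) :
    dec (peak_map_height s).1 (peak_map_height s).2 = s ∧
      (peak_map_height s).2 ≤ tr (peak_map_height s).1 := by
  obtain ⟨m, h, hdec, hv⟩ := exists_dec s
  rw [← hdec, pmh_eq m h hv (by omega)]
  exact ⟨rfl, hv⟩

-- step lemma, right child: bit h of m set
theorem step_right (s m h : ℕ) (hs : peak_map_height s = (m, h)) (hb : s + 1 < 2 ^ 64)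
    (hbit : h < tr m) : peak_map_height (s + 1) = (m, h + 1) := by
  have hsound := pmh_sound s (by omega)
  rw [hs] at hsound
  dsimp only at hsound
  obtain ⟨hdec, _⟩ := hsound
  have hnext : dec m (h + 1) = s + 1 := by
    have := dec_eq m (h + 1); have := dec_eq m h; omega
  rw [← hnext]
  exact pmh_eq m (h + 1) hbit (by omega)

-- step lemmas, left child: bit h of m clear (h = tr m)
theorem step_left_succ (s m h : ℕ) (hs : peak_map_height s = (m, h)) (hb : s + 1 < 2 ^ 64)
    (htr : tr m = h) : peak_map_height (s + 1) = (m + 1, 0) := by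
  have hsound := pmh_sound s (by omega)
  rw [hs] at hsound
  dsimp only at hsound
  obtain ⟨hdec, _⟩ := hsound
  have hnext : dec (m + 1) 0 = s + 1 := by
    have := dec_eq (m + 1) 0
    have := dec_eq m h
    have := pc_succ m
    omega
  rw [← hnext]
  have hp : (1 : ℕ) ≤ 2 ^ h := Nat.one_le_two_pow
  exact pmh_eq (m + 1) 0 (Nat.zero_le _) (by omega)

theorem step_left_parent (s m h : ℕ) (hs : peak_map_height s = (m, h))
    (hb : s + 2 ^ (h + 1) < 2 ^ 64) (htr : tr m = h) :
    peak_map_height (s + 2 ^ (h + 1)) = (m + 2 ^ h, h + 1) := by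
  have hp0 : (1 : ℕ) ≤ 2 ^ h := Nat.one_le_two_pow
  have hp1 : (2 : ℕ) ^ (h + 1) = 2 * 2 ^ h := by rw [pow_succ]; ring
  have hsound := pmh_sound s (by omega)
  rw [hs] at hsound
  dsimp only at hsound
  obtain ⟨hdec, hle⟩ := hsound
  have hbit : m / 2 ^ h % 2 = 0 := by
    have hiff := div_parity_tr h m hle
    have hne : ¬(m / 2 ^ h % 2 = 1) := fun hc => absurd (hiff.mp hc) (by omega)
    omega
  have hpc : pc (m + 2 ^ h) = pc m + 1 := pc_add_pow h m hbit
  have hnext : dec (m + 2 ^ h) (h + 1) = s + 2 ^ (h + 1) := by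
    have := dec_eq (m + 2 ^ h) (h + 1)
    have := dec_eq m h
    have h2 : (2 : ℕ) ^ (h + 1) = 2 * 2 ^ h := by rw [pow_succ]; ring
    omega
  rw [← hnext]
  have hp : (1 : ℕ) ≤ 2 ^ h := Nat.one_le_two_pow
  exact pmh_eq (m + 2 ^ h) (h + 1) (tr_add_pow_of_tr h m htr) (by omega)

-- any node at height h has position ≥ 2^h - 1
theorem pmh_pos_ge (s m h : ℕ) (hs : s < 2 ^ 64) (hpmh : peak_map_height s = (m, h)) :
    2 ^ h - 1 ≤ s := by
  have hsound := pmh_sound s hs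
  rw [hpmh] at hsound
  dsimp only at hsound
  obtain ⟨hdec, hle⟩ := hsound
  have h1 := two_pow_sub_one_le_of_tr h m hle
  have h2 := m_le_dec m h
  omega

-- A's accumulator loop equals `acc ++` B's cons-building climb, given enough fuel
theorem loop_eq (fuel : ℕ) : ∀ (mmr_size : Int) (current m h pm : ℕ) (acc : List (Int × Int)),
    mmr_size ≤ 2 ^ 33 → current < 2 ^ 34 →
    35 ≤ h + fuel →
    peak_map_height current = (m, h) →
    pm / 2 ^ h = m / 2 ^ h →
    fbLoopA mmr_size current acc = acc ++ climbB current (2 ^ h) pm mmr_size fuel := by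
  induction fuel with
  | zero =>
    intro mmr current m h pm acc hmmr hcur hfuel hpmh hinv
    have hge : 2 ^ h - 1 ≤ current := pmh_pos_ge current m h (by omega) hpmh
    have h35 : (2 : ℕ) ^ 35 ≤ 2 ^ h := Nat.pow_le_pow_right (by norm_num) (by omega)
    have h1 := stepA_lt current
    rw [fbLoopA, if_pos (show mmr ≤ ((stepA current).1 : Int) by
      have : (2 : ℕ) ^ 35 ≤ 2 ^ 35 := le_rfl
      have hbig : (2 : ℕ) ^ 33 < 2 ^ 35 := by norm_num
      omega)]
    rw [climbB]
    simp
  | succ fuel ih =>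
    intro mmr current m h pm acc hmmr hcur hfuel hpmh hinv
    have hp0 : (0 : ℕ) < 2 ^ h := Nat.two_pow_pos h
    have hp1 : (2 : ℕ) ^ (h + 1) = 2 * 2 ^ h := by rw [pow_succ]; ring
    have hp1le : (1 : ℕ) ≤ 2 ^ (h + 1) := Nat.one_le_two_pow
    -- h ≤ 34 here: current < 2^34 and current ≥ 2^h - 1
    have hge : 2 ^ h - 1 ≤ current := pmh_pos_ge current m h (by omega) hpmh
    have hh34 : h ≤ 34 := by
      by_contra hc
      have : (2 : ℕ) ^ 35 ≤ 2 ^ h := Nat.pow_le_pow_right (by norm_num) (by omega)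
      have : (2 : ℕ) ^ 34 < 2 ^ 35 := by norm_num
      omega
    have hhp : (2 : ℕ) ^ (h + 1) ≤ 2 ^ 35 := Nat.pow_le_pow_right (by norm_num) (by omega)
    have h35 : (2 : ℕ) ^ 35 = 34359738368 := by norm_num
    have hsound := pmh_sound current (by omega)
    rw [hpmh] at hsound
    dsimp only at hsound
    obtain ⟨hdec, hle⟩ := hsound
    -- B's bit test reads the same bit of m
    have htestB : (pm &&& 2 ^ h ≠ 0) ↔ m / 2 ^ h % 2 = 1 := by
      have hbt : pm &&& 2 ^ h = (pm.testBit h).toNat * 2 ^ h := Nat.and_two_pow pm h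
      simp only [hbt, Nat.testBit_eq_decide_div_mod_eq, hinv]
      by_cases hd : m / 2 ^ h % 2 = 1 <;> simp [hd]
    by_cases hbit : m / 2 ^ h % 2 = 1
    · -- right child
      have hhl : h < tr m := (div_parity_tr h m hle).mp hbit
      have hA1 : peak_map_height (current + 1) = (m, h + 1) :=
        step_right current m h hpmh (by omega) hhl
      have hsA : stepA current =
          (current + 1, (current : Int) - ((2 ^ (h + 1) - 1 : ℕ) : Int)) := by
        unfold stepA bintree_postorder_height
        rw [hpmh, hA1]
        dsimp only
        rw [if_pos (Nat.lt_succ_self h)]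
      have hsib : (current : Int) - ((2 ^ (h + 1) - 1 : ℕ) : Int) =
          (current : Int) + 1 - 2 * ((2 ^ h : ℕ) : Int) := by omega
      rw [fbLoopA, hsA, climbB]
      simp only [if_pos (htestB.mpr hbit)]
      rw [hsib]
      by_cases hstop : mmr ≤ ((current + 1 : ℕ) : Int)
      · rw [if_pos hstop, if_pos hstop]; simp
      · rw [if_neg hstop, if_neg hstop]
        have h2p : 2 * 2 ^ h = 2 ^ (h + 1) := by omega
        rw [h2p]
        rw [ih mmr (current + 1) m (h + 1) pm _ hmmr (by omega) (by omega) hA1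
          (by rw [pow_succ, ← Nat.div_div_eq_div_mul, ← Nat.div_div_eq_div_mul, hinv])]
        simp
    · -- left child
      have hEq : tr m = h := by
        have hiff := div_parity_tr h m hle
        have hnl : ¬(h < tr m) := fun hc => hbit (hiff.mpr hc)
        omega
      have hA1 : peak_map_height (current + 1) = (m + 1, 0) :=
        step_left_succ current m h hpmh (by omega) hEq
      have hA2 : peak_map_height (current + 2 ^ (h + 1)) = (m + 2 ^ h, h + 1) :=
        step_left_parent current m h hpmh (by omega) hEq
      have hsA : stepA current =
          (current + (2 ^ (h + 1) - 1) + 1, (current : Int) + ((2 ^ (h + 1) - 1 : ℕ) : Int)) := by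
        unfold stepA bintree_postorder_height
        rw [hpmh, hA1]
        dsimp only
        rw [if_neg (Nat.not_lt_zero h)]
      have hBtest : ¬(pm &&& 2 ^ h ≠ 0) := fun hc => hbit (htestB.mp hc)
      have hpar : current + (2 ^ (h + 1) - 1) + 1 = current + 2 * 2 ^ h := by omega
      have hsib : (current : Int) + ((2 ^ (h + 1) - 1 : ℕ) : Int) =
          (current : Int) + 2 * ((2 ^ h : ℕ) : Int) - 1 := by omega
      have hbit0 : m / 2 ^ h % 2 = 0 := by omega
      rw [fbLoopA, hsA, climbB]
      simp only [if_neg hBtest]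
      rw [hpar, hsib]
      by_cases hstop : mmr ≤ ((current + 2 * 2 ^ h : ℕ) : Int)
      · rw [if_pos hstop, if_pos hstop]; simp
      · rw [if_neg hstop, if_neg hstop]
        have h2p : 2 * 2 ^ h = 2 ^ (h + 1) := by omega
        rw [h2p]
        rw [ih mmr (current + 2 ^ (h + 1)) (m + 2 ^ h) (h + 1) pm _ hmmr (by omega)
          (by omega) hA2
          (by rw [div_add_pow h m hbit0, pow_succ, ← Nat.div_div_eq_div_mul,
                ← Nat.div_div_eq_div_mul, hinv])]
        simp

-- ===== VERDICT (by name: the statement is the Claim_ definition above) =====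
theorem family_branch_spec : Claim_equal_family_branch := by
  intro pos0 mmr_size hdom hpre
  unfold Spec_family_branch family_branch family_branch_alt
  have hdom' : pos0 ≤ 2147483648 ∧ mmr_size ≤ 2147483648 := by
    unfold Dom_family_branch pvDomInt at hdom
    simp at hdom; omega
  have hlt : pos0.toNat < 2 ^ 64 := by omega
  rw [← pmh_eq_pmhB pos0.toNat hlt]
  exact (loop_eq 64 mmr_size pos0.toNat
    (peak_map_height pos0.toNat).1 (peak_map_height pos0.toNat).2
    (peak_map_height pos0.toNat).1 [] (by omega) (by omega) (by omega) rfl rfl).trans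
    (by simp)
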